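-- pv_equiv track=rewrite | github.com/artem-aksenkin/ansible_cm | day-3/filter_plugins/filter.py | get_mongo_src
-- ===== SOURCE A (Python) =====
-- def get_mongo_src(args, os_family, os_ver, mongo_ver):
--     result = []
--     if os_family == 'RedHat':
--         os_family == 'rhel'
--     for arg in args:
--         count = arg.find(os_family)
--         if count != -1:
--             count = arg.find(os_ver, count+len(os_family))
--             if count != -1:
--                 count = arg.find(mongo_ver, count+len(os_ver))
--                 if count != -1:
--                     result.append(arg)
--     return result
-- ===== SOURCE B (Python) =====
-- def get_mongo_src(args, os_family, os_ver, mongo_ver):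
--     # Cursor machine: one left-to-right walk over each string, consuming the
--     # queue of pending terms with startswith; no find() calls, no dead branch.
--     def matched(arg):
--         pending = [os_family, os_ver, mongo_ver]
--         i = 0
--         while pending:
--             t = pending[0]
--             if arg.startswith(t, i):
--                 i += len(t)
--                 pending = pending[1:]
--             elif i < len(arg):
--                 i += 1
--             else:
--                 return False
--         return True
--     return [arg for arg in args if matched(arg)]
-- ===== Notes on version B (the rewrite author's own statement) =====
-- stated objective: alternative
-- what changed: Replaces A's three chained arg.find calls (and its dead RedHat no-op line) with a single cursor machine per string: one left-to-right position walk that consumes a queue of pending terms via startswith, collecting args whose whole queue is consumed.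
import Mathlib
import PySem

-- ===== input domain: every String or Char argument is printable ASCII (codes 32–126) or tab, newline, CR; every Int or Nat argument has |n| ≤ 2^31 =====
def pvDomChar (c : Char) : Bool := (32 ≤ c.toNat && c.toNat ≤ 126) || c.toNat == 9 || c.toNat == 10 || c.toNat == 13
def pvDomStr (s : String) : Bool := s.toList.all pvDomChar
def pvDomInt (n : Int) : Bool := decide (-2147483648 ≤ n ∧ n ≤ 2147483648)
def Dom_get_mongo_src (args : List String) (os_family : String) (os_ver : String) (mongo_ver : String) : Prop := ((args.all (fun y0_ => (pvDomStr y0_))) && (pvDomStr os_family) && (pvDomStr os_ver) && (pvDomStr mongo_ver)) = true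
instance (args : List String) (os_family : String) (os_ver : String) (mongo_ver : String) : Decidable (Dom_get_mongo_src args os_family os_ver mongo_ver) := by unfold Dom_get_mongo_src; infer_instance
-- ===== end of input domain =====

-- B replaces A's three chained find calls (and A's dead RedHat no-op line) with a cursor
-- machine: one left-to-right walk per string consuming a queue of pending terms via
-- startswith; objective: alternative (same cost, different algorithmic decomposition).


-- ===== PORT A =====
-- Literal port of A.  Python's 'if os_family == "RedHat": os_family == "rhel"' line is a
-- bare comparison expression (not an assignment): it binds nothing, so it is omitted.
def get_mongo_src (args : List String) (os_family : String) (os_ver : String) (mongo_ver : String) : List String :=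
  args.foldl (fun result arg =>
    let count := PySem.Str.find arg os_family
    if count ≠ -1 then
      let count := PySem.Str.findFrom arg os_ver (count + PySem.Str.len os_family) none
      if count ≠ -1 then
        let count := PySem.Str.findFrom arg mongo_ver (count + PySem.Str.len os_ver) none
        if count ≠ -1 then result ++ [arg] else result
      else result
    else result) []

-- ===== PORT B =====
-- B's cursor machine: the cursor position i over the string is rendered as the suffix of
-- the char list still to be walked; the pending-term queue is consumed on startswith.
def pvScan (s : List Char) (pending : List (List Char)) : Bool :=
  match pending with
  | [] => true
  | t :: ts =>
    if PySem.Chars.startswith s t then pvScan (s.drop t.length) ts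
    else
      match s with
      | [] => false
      | _ :: rest => pvScan rest (t :: ts)
termination_by s.length + pending.length
decreasing_by
  all_goals simp [List.length_drop]
  all_goals omega

def get_mongo_src_alt (args : List String) (os_family : String) (os_ver : String) (mongo_ver : String) : List String :=
  args.filter (fun arg => pvScan arg.toList [os_family.toList, os_ver.toList, mongo_ver.toList])

-- ===== PRECONDITION & SPEC =====
def Spec_get_mongo_src (args : List String) (os_family : String) (os_ver : String) (mongo_ver : String) (out : List String) : Prop := out = get_mongo_src_alt args os_family os_ver mongo_ver
instance (args : List String) (os_family : String) (os_ver : String) (mongo_ver : String) (out : List String) : Decidable (Spec_get_mongo_src args os_family os_ver mongo_ver out) := by unfold Spec_get_mongo_src; infer_instance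

-- ===== CLAIM (what is proved, stated in full; the proofs are below) =====
def Claim_equal_get_mongo_src : Prop := ∀ (args : List String) (os_family : String) (os_ver : String) (mongo_ver : String), Dom_get_mongo_src args os_family os_ver mongo_ver → Spec_get_mongo_src args os_family os_ver mongo_ver (get_mongo_src args os_family os_ver mongo_ver)

-- ===== LEMMAS AND PROOFS =====

theorem find_nonneg_of_ne {s t : List Char} (h : PySem.Chars.find s t ≠ -1) :
    0 ≤ PySem.Chars.find s t := by
  have := PySem.Chars.neg_one_le_find s t
  omega

-- find points at 0 exactly when the pattern is a prefix
theorem find_of_prefix {s t : List Char} (h : t <+: s) : PySem.Chars.find s t = 0 := by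
  have hnn : 0 ≤ PySem.Chars.find s t := (PySem.Chars.find_nonneg_iff s t).mpr h.isInfix
  have hspec := PySem.Chars.find_spec hnn
  by_contra hne
  have hpos : 0 < (PySem.Chars.find s t).toNat := by omega
  exact hspec.2 0 hpos (by simpa using h)

-- cons step of find when the pattern is not a prefix
theorem find_cons_of_not_prefix {c : Char} {rest t : List Char} (h : ¬ t <+: (c :: rest)) :
    PySem.Chars.find (c :: rest) t =
      if PySem.Chars.find rest t = -1 then -1 else PySem.Chars.find rest t + 1 := by
  by_cases hr : PySem.Chars.find rest t = -1
  · simp only [hr, if_pos]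
    rw [PySem.Chars.find_eq_neg_one_iff]
    intro hinf
    rcases List.infix_cons_iff.mp hinf with hp | hi
    · exact h hp
    · exact (PySem.Chars.find_eq_neg_one_iff rest t).mp hr hi
  · rw [if_neg hr]
    have hnn : 0 ≤ PySem.Chars.find rest t := find_nonneg_of_ne hr
    obtain ⟨hpre, hmin⟩ := PySem.Chars.find_spec hnn
    set n := (PySem.Chars.find rest t).toNat with hn
    have hpre' : t <+: (c :: rest).drop (n + 1) := by simpa using hpre
    have hnn0 : 0 ≤ PySem.Chars.find (c :: rest) t := by
      apply (PySem.Chars.find_nonneg_iff _ t).mpr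
      exact List.infix_cons_iff.mpr (Or.inr (hpre.isInfix.trans (List.drop_suffix n rest).isInfix))
    obtain ⟨hpreN, hminN⟩ := PySem.Chars.find_spec hnn0
    set N := (PySem.Chars.find (c :: rest) t).toNat with hN
    have hN0 : N ≠ 0 := by
      intro h0
      apply h
      simpa [h0] using hpreN
    have hNeq : N = n + 1 := by
      rcases lt_trichotomy N (n + 1) with hlt | heq | hgt
      · exfalso
        obtain ⟨mm, hm⟩ : ∃ mm, N = mm + 1 := ⟨N - 1, by omega⟩
        have hq : t <+: rest.drop mm := by
          have hx := hpreN; rw [hm] at hx; simpa using hx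
        exact hmin mm (by omega) hq
      · exact heq
      · exact absurd hpre' (hminN (n + 1) hgt)
    omega

-- an occurrence fits: the end of the found pattern stays inside the string
theorem find_end_le {s t : List Char} (h : 0 ≤ PySem.Chars.find s t) :
    (PySem.Chars.find s t).toNat + t.length ≤ s.length := by
  have hpre := (PySem.Chars.find_spec h).1
  have h1 : t.length ≤ (s.drop (PySem.Chars.find s t).toNat).length := hpre.length_le
  have h2 : PySem.Chars.find s t ≤ (s.length : Int) := PySem.Chars.find_le_length s t
  simp [List.length_drop] at h1
  omega

-- B's cursor machine, expressed through find: it consumes the FIRST occurrence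
theorem scan_step (s t : List Char) (ts : List (List Char)) :
    pvScan s (t :: ts) =
      if PySem.Chars.find s t = -1 then false
      else pvScan (s.drop ((PySem.Chars.find s t).toNat + t.length)) ts := by
  induction s with
  | nil =>
    by_cases ht : t = []
    · subst ht
      rw [pvScan]
      simp [PySem.Chars.find_nil, PySem.Chars.startswith_iff]
    · rw [pvScan]
      have hnp : ¬ t <+: ([] : List Char) := by
        intro hp; exact ht (List.prefix_nil.mp hp)
      have hf : PySem.Chars.find [] t = -1 := by
        rw [PySem.Chars.find_eq_neg_one_iff]
        intro hi; exact ht (List.infix_nil.mp hi)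
      simp [hf, PySem.Chars.startswith_iff, hnp]
  | cons c rest ih =>
    by_cases hp : t <+: (c :: rest)
    · rw [pvScan]
      have hf := find_of_prefix hp
      simp [hf, PySem.Chars.startswith_iff, hp]
    · rw [pvScan]
      have hsw : PySem.Chars.startswith (c :: rest) t = false := by
        rw [← Bool.not_eq_true, PySem.Chars.startswith_iff]; exact hp
      rw [hsw]
      simp only [Bool.false_eq_true, if_false]
      rw [ih, find_cons_of_not_prefix hp]
      rcases eq_or_ne (PySem.Chars.find rest t) (-1) with hr | hr
      · simp [hr]
      · have hnn : 0 ≤ PySem.Chars.find rest t := find_nonneg_of_ne hr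
        have hne : PySem.Chars.find rest t + 1 ≠ -1 := by omega
        rw [if_neg hr, if_neg hr, if_neg hne]
        have htn : (PySem.Chars.find rest t + 1).toNat + t.length
            = ((PySem.Chars.find rest t).toNat + t.length) + 1 := by omega
        rw [htn, List.drop_succ_cons]

-- per-element agreement: A's three-find chain computes B's cursor-machine verdict
theorem elem_eq (s tf tv tm : List Char) :
    (if PySem.Chars.find s tf ≠ -1 then
       (if PySem.Chars.findFrom s tv (PySem.Chars.find s tf + (tf.length : Int)) none ≠ -1 then
          decide (PySem.Chars.findFrom s tm
            (PySem.Chars.findFrom s tv (PySem.Chars.find s tf + (tf.length : Int)) none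
              + (tv.length : Int)) none ≠ -1)
        else false)
     else false)
    = pvScan s [tf, tv, tm] := by
  rw [scan_step]
  rcases eq_or_ne (PySem.Chars.find s tf) (-1) with h1 | h1
  · simp [h1]
  · have hnn1 : 0 ≤ PySem.Chars.find s tf := find_nonneg_of_ne h1
    set k1 : Nat := (PySem.Chars.find s tf).toNat + tf.length with hk1
    have hk1le : k1 ≤ s.length := find_end_le hnn1
    have hcast1 : PySem.Chars.find s tf + (tf.length : Int) = (k1 : Int) := by
      rw [hk1]; push_cast; omega
    rw [hcast1, PySem.Chars.findFrom_natCast s tv k1 hk1le, scan_step]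
    rcases eq_or_ne (PySem.Chars.find (s.drop k1) tv) (-1) with h2 | h2
    · simp [h1, h2]
    · have hnn2 : 0 ≤ PySem.Chars.find (s.drop k1) tv := find_nonneg_of_ne h2
      have hne2 : (k1 : Int) + PySem.Chars.find (s.drop k1) tv ≠ -1 := by omega
      set k2 : Nat := k1 + ((PySem.Chars.find (s.drop k1) tv).toNat + tv.length) with hk2
      have hj2end := find_end_le hnn2
      have hk2le : k2 ≤ s.length := by
        simp [List.length_drop] at hj2end
        omega
      have hcast2 : (if PySem.Chars.find (s.drop k1) tv = -1 then -1
            else (k1 : Int) + PySem.Chars.find (s.drop k1) tv) + (tv.length : Int)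
          = (k2 : Int) := by
        rw [if_neg h2, hk2]; push_cast; omega
      have hdrop2 : (s.drop k1).drop ((PySem.Chars.find (s.drop k1) tv).toNat + tv.length)
          = s.drop k2 := by
        rw [List.drop_drop, hk2]
      rw [hcast2, PySem.Chars.findFrom_natCast s tm k2 hk2le, hdrop2, scan_step]
      rcases eq_or_ne (PySem.Chars.find (s.drop k2) tm) (-1) with h3 | h3
      · simp [h1, h2, hne2, h3]
      · have hnn3 : 0 ≤ PySem.Chars.find (s.drop k2) tm := find_nonneg_of_ne h3
        have hne3 : (k2 : Int) + PySem.Chars.find (s.drop k2) tm ≠ -1 := by omega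
        simp [h1, h2, hne2, h3, hne3, pvScan]

-- A's foldl over args is B's filter
theorem foldl_filter (f v m : String) (args : List String) (acc : List String) :
    args.foldl (fun result arg =>
      let count := PySem.Str.find arg f
      if count ≠ -1 then
        let count := PySem.Str.findFrom arg v (count + PySem.Str.len f) none
        if count ≠ -1 then
          let count := PySem.Str.findFrom arg m (count + PySem.Str.len v) none
          if count ≠ -1 then result ++ [arg] else result
        else result
      else result) acc
    = acc ++ args.filter (fun arg => pvScan arg.toList [f.toList, v.toList, m.toList]) := by
  induction args generalizing acc with
  | nil => simp
  | cons a rest ih =>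
    simp only [List.foldl_cons, List.filter_cons]
    have h := elem_eq a.toList f.toList v.toList m.toList
    by_cases hb : pvScan a.toList [f.toList, v.toList, m.toList]
    · rw [hb] at h
      simp only [hb, if_pos]
      simp only [PySem.Str.find_eq, PySem.Str.findFrom_eq, PySem.Str.len_eq]
      split_ifs at h ⊢ <;> simp_all
    · rw [Bool.not_eq_true] at hb
      rw [hb] at h
      simp only [hb, Bool.false_eq_true, if_false]
      simp only [PySem.Str.find_eq, PySem.Str.findFrom_eq, PySem.Str.len_eq]
      split_ifs at h ⊢ <;> simp_all

-- ===== VERDICT (by name: the statement is the Claim_ definition above) =====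
theorem get_mongo_src_spec : Claim_equal_get_mongo_src := by
  intro args f v m _
  unfold Spec_get_mongo_src get_mongo_src get_mongo_src_alt
  simpa using foldl_filter f v m args []
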